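-- pv_equiv track=rewrite | github.com/Ethan-113/School_manage | Course_Activity.py | get_crashclassnum
-- ===== SOURCE A (Python) =====
-- time_start = {1: 800, 2: 900, 3: 1000, 4: 1300, 5: 1400, 6: 1500, 7: 1800, 8: 1900}
--
-- def get_crashclassnum(time):  # 获取到可能会与活动有冲突的第几节课
--     class_num = []
--     if int(time) + 100 > time_start[1] and int(time) + 100 < time_start[1] + 100:
--         class_num.append(1)
--     elif int(time) > time_start[8] and int(time) < time_start[8] + 100:
--         class_num.append(8)
--     for i in time_start:
--         if i < 8:
--             if int(time) >= time_start[i] and int(time) <= time_start[i + 1]: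
--                 if int(time) < time_start[i] + 100 and int(time) + 100 <= time_start[i + 1]:
--                     class_num.append(i)
--                     break
--                 if int(time) < time_start[i] + 100 and int(time) + 100 > time_start[i + 1]:
--                     class_num.append(i)
--                     class_num.append(i + 1)
--                     break
--                 if int(time) >= time_start[i] + 100 and int(time) + 100 > time_start[i + 1]:
--                     class_num.append(i + 1)
--                     break
--     return class_num
-- ===== SOURCE B (Python) =====
-- time_start = {1: 800, 2: 900, 3: 1000, 4: 1300, 5: 1400, 6: 1500, 7: 1800, 8: 1900}
--
-- def get_crashclassnum(time):
--     return [i for i in range(1, 9)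
--             if int(time) < time_start[i] + 100 and int(time) + 100 > time_start[i]]
-- ===== Notes on version B (the rewrite author's own statement) =====
-- stated objective: simpler
-- what changed: Replaces A's special-case first/elif branches, interval-containment scan over consecutive class pairs and early break with a single uniform interval-overlap filter over classes 1..8.
import Mathlib
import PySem

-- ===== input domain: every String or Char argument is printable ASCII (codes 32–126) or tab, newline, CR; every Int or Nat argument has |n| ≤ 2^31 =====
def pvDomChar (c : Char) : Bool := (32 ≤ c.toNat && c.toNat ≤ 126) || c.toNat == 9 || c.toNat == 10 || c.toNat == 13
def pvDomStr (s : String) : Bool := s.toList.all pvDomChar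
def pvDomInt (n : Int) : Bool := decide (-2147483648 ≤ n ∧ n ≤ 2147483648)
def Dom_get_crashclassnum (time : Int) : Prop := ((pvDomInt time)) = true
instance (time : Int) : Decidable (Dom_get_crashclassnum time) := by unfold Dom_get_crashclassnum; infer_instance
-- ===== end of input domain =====

-- B replaces A's special-case first/elif branches, pairwise interval-containment scan and early
-- break with one uniform overlap filter over classes 1..8 (objective: simpler).

-- ===== PORT A =====
-- module-level: time_start = {1: 800, 2: 900, 3: 1000, 4: 1300, 5: 1400, 6: 1500, 7: 1800, 8: 1900}
def timeStart : PySem.Dict Int Int :=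
  PySem.Dict.ofList [(1, 800), (2, 900), (3, 1000), (4, 1300), (5, 1400), (6, 1500), (7, 1800), (8, 1900)]

-- time_start[i]; every key A looks up is present, so the KeyError default 0 is never taken
def tsA (i : Int) : Int := (timeStart.get? i).getD 0

-- the `for i in time_start:` loop with its `break`s; acc = class_num built so far
def loopA (time : Int) (acc : List Int) : List Int → List Int
  | [] => acc
  | i :: rest =>
    if i < 8 then
      if time ≥ tsA i ∧ time ≤ tsA (i + 1) then
        if time < tsA i + 100 ∧ time + 100 ≤ tsA (i + 1) then acc ++ [i]
        else if time < tsA i + 100 ∧ time + 100 > tsA (i + 1) then acc ++ [i, i + 1]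
        else if time ≥ tsA i + 100 ∧ time + 100 > tsA (i + 1) then acc ++ [i + 1]
        else loopA time acc rest
      else loopA time acc rest
    else loopA time acc rest

def get_crashclassnum (time : Int) : List Int :=
  let class_num : List Int :=
    if time + 100 > tsA 1 ∧ time + 100 < tsA 1 + 100 then [1]
    else if time > tsA 8 ∧ time < tsA 8 + 100 then [8]
    else []
  loopA time class_num timeStart.keys

-- ===== PORT B =====
def get_crashclassnum_alt (time : Int) : List Int :=
  (PySem.List.pyRange 1 9 1).filter
    (fun i => decide (time < tsA i + 100 ∧ time + 100 > tsA i))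

-- ===== PRECONDITION & SPEC =====
def Spec_get_crashclassnum (time : Int) (out : List Int) : Prop := out = get_crashclassnum_alt time
instance (time : Int) (out : List Int) : Decidable (Spec_get_crashclassnum time out) := by unfold Spec_get_crashclassnum; infer_instance

-- ===== CLAIM (what is proved, stated in full; the proofs are below) =====
def Claim_equal_get_crashclassnum : Prop := ∀ (time : Int), Dom_get_crashclassnum time → Spec_get_crashclassnum time (get_crashclassnum time)

-- ===== LEMMAS AND PROOFS =====
theorem ts_keys : timeStart.keys = [1, 2, 3, 4, 5, 6, 7, 8] := by decide
theorem range19 : PySem.List.pyRange 1 9 1 = [1, 2, 3, 4, 5, 6, 7, 8] := by decide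
theorem tsA1 : tsA 1 = 800 := by decide
theorem tsA2 : tsA 2 = 900 := by decide
theorem tsA3 : tsA 3 = 1000 := by decide
theorem tsA4 : tsA 4 = 1300 := by decide
theorem tsA5 : tsA 5 = 1400 := by decide
theorem tsA6 : tsA 6 = 1500 := by decide
theorem tsA7 : tsA 7 = 1800 := by decide
theorem tsA8 : tsA 8 = 1900 := by decide

theorem loopA_skip (time : Int) (acc : List Int) (i : Int) (rest : List Int)
    (h8 : i < 8) (hc : ¬(time ≥ tsA i ∧ time ≤ tsA (i + 1))) :
    loopA time acc (i :: rest) = loopA time acc rest := by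
  simp only [loopA, if_pos h8, if_neg hc]

theorem loopA_last (time : Int) (acc : List Int) (i : Int) (rest : List Int)
    (h8 : ¬ i < 8) : loopA time acc (i :: rest) = loopA time acc rest := by
  simp only [loopA, if_neg h8]

-- outside 700 < time < 2000 both programs return []
theorem outA (time : Int) (h : time ≤ 700 ∨ 2000 ≤ time) : get_crashclassnum time = [] := by
  simp only [get_crashclassnum, ts_keys]
  rw [loopA_skip _ _ 1 _ (by norm_num) (by simp only [show (1:Int)+1 = 2 from by norm_num, tsA1, tsA2]; omega),
      loopA_skip _ _ 2 _ (by norm_num) (by simp only [show (2:Int)+1 = 3 from by norm_num, tsA2, tsA3]; omega),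
      loopA_skip _ _ 3 _ (by norm_num) (by simp only [show (3:Int)+1 = 4 from by norm_num, tsA3, tsA4]; omega),
      loopA_skip _ _ 4 _ (by norm_num) (by simp only [show (4:Int)+1 = 5 from by norm_num, tsA4, tsA5]; omega),
      loopA_skip _ _ 5 _ (by norm_num) (by simp only [show (5:Int)+1 = 6 from by norm_num, tsA5, tsA6]; omega),
      loopA_skip _ _ 6 _ (by norm_num) (by simp only [show (6:Int)+1 = 7 from by norm_num, tsA6, tsA7]; omega),
      loopA_skip _ _ 7 _ (by norm_num) (by simp only [show (7:Int)+1 = 8 from by norm_num, tsA7, tsA8]; omega),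
      loopA_last _ _ 8 _ (by norm_num)]
  simp only [loopA, tsA1, tsA8]
  split_ifs <;> first | rfl | omega

theorem outB (time : Int) (h : time ≤ 700 ∨ 2000 ≤ time) : get_crashclassnum_alt time = [] := by
  rw [get_crashclassnum_alt, range19]
  refine List.filter_eq_nil_iff.mpr ?_
  intro a ha
  fin_cases ha <;>
    simp only [decide_eq_true_eq, not_and, not_lt, tsA1, tsA2, tsA3, tsA4, tsA5, tsA6, tsA7, tsA8] <;>
    omega

-- the finitely many remaining inputs, checked by evaluation
set_option maxHeartbeats 4000000 in
set_option maxRecDepth 20000 in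
theorem mid : ∀ t ∈ PySem.List.pyRange 701 2000 1, get_crashclassnum t = get_crashclassnum_alt t := by
  decide

-- ===== VERDICT (by name: the statement is the Claim_ definition above) =====
theorem get_crashclassnum_spec : Claim_equal_get_crashclassnum := by
  intro time _
  show get_crashclassnum time = get_crashclassnum_alt time
  rcases le_or_gt time 700 with h | h
  · rw [outA time (Or.inl h), outB time (Or.inl h)]
  · rcases le_or_gt 2000 time with h2 | h2
    · rw [outA time (Or.inr h2), outB time (Or.inr h2)]
    · exact mid time (PySem.List.mem_pyRange_one.mpr ⟨by omega, by omega⟩)
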